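-- pv_equiv track=rewrite | github.com/Nir-P/nir-fix | app.py | reverse_text
-- ===== SOURCE A (Python) =====
-- def reverse_text(text):
--     text_lines = text.split("\n")
--     for line_num in range(len(text_lines)):
--         text_lines[line_num] = text_lines[line_num].split(" ")[::-1]
--         for word_num in range(len(text_lines[line_num])):
--             text_lines[line_num][word_num] = text_lines[line_num][word_num][::-1]
--         text_lines[line_num] = " ".join(text_lines[line_num])
--     return "".join(text_lines[::-1])
-- ===== SOURCE B (Python) =====
-- def reverse_text(text):
--     # Reversing each word and the word order reverses each line; reversing the
--     # line order too means the whole text is simply reversed, minus the newlines.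
--     return text[::-1].replace("\n", "")
-- ===== Notes on version B (the rewrite author's own statement) =====
-- stated objective: simpler
-- what changed: B replaces the per-line/per-word split-reverse-join loops by one closed-form expression: reverse the whole string and delete the newlines, which is provably the same value.
import Mathlib
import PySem

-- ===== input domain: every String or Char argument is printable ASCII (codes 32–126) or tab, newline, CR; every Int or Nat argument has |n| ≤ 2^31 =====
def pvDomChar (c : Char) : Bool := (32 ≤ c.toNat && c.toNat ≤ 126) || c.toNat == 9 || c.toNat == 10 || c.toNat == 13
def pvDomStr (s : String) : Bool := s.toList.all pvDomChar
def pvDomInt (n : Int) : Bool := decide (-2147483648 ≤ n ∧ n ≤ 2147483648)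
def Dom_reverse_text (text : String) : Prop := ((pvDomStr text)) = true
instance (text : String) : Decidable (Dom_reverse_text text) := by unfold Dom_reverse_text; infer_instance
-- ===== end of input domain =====

-- B computes A's per-line split/reverse/join loops as one closed form: reverse the whole string and delete the newlines.

-- ===== PORT A =====
def reverse_text (text : String) : String :=
  let text_lines := PySem.Chars.splitOn text.toList ['\n']
  let text_lines := text_lines.map (fun line =>
    let words := (PySem.Chars.splitOn line [' ']).reverse
    let words := words.map (fun w => w.reverse)
    PySem.Chars.join [' '] words)
  String.ofList (PySem.Chars.join [] text_lines.reverse)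

-- ===== PORT B =====
def reverse_text_alt (text : String) : String :=
  String.ofList (PySem.Chars.replace text.toList.reverse ['\n'] [])

-- ===== PRECONDITION & SPEC =====
def Spec_reverse_text (text : String) (out : String) : Prop := out = reverse_text_alt text
instance (text : String) (out : String) : Decidable (Spec_reverse_text text out) := by unfold Spec_reverse_text; infer_instance

-- ===== CLAIM (what is proved, stated in full; the proofs are below) =====
def Claim_equal_reverse_text : Prop := ∀ (text : String), Dom_reverse_text text → Spec_reverse_text text (reverse_text text)

-- ===== LEMMAS AND PROOFS =====

/-- Simple structural single-character split (proof-side model of `PySem.Chars.splitOn · [c]`). -/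
def splitC (c : Char) : List Char → List (List Char)
  | [] => [[]]
  | x :: t =>
    if x = c then [] :: splitC c t
    else
      match splitC c t with
      | p :: ps => (x :: p) :: ps
      | [] => [[x]]

lemma splitC_ne_nil (c : Char) (l : List Char) : splitC c l ≠ [] := by
  induction l with
  | nil => simp [splitC]
  | cons x t ih =>
    simp only [splitC]
    split_ifs
    · simp
    · cases h : splitC c t <;> simp

lemma splitOn_go_spec (c : Char) : ∀ (fuel : Nat) (l cur : List Char) (acc : List (List Char)),
    l.length ≤ fuel →
    PySem.Chars.splitOn.go [c] fuel l cur acc =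
      acc.reverse ++ (match splitC c l with
        | p :: ps => (cur.reverse ++ p) :: ps
        | [] => []) := by
  intro fuel
  induction fuel with
  | zero =>
    intro l cur acc h
    have : l = [] := List.eq_nil_of_length_eq_zero (Nat.le_zero.mp h)
    subst this
    simp [PySem.Chars.splitOn.go, splitC]
  | succ fuel ih =>
    intro l cur acc h
    cases l with
    | nil => simp [PySem.Chars.splitOn.go, splitC]
    | cons x t =>
      simp only [PySem.Chars.splitOn.go]
      by_cases hx : x = c
      · subst hx
        have hpre : [x].isPrefixOf (x :: t) = true := by simp [List.isPrefixOf]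
        rw [if_pos hpre]
        simp only [List.length_cons, List.length_nil, List.drop_succ_cons, List.drop_zero]
        simp only [List.length_cons] at h
        rw [ih _ _ _ (by omega)]
        simp only [splitC, if_pos]
        cases hs : splitC x t with
        | nil => exact absurd hs (splitC_ne_nil x t)
        | cons p ps => simp
      · have hpre : [c].isPrefixOf (x :: t) = false := by
          simp [List.isPrefixOf]
          exact fun hxc => hx hxc.symm
        rw [if_neg (by simp [hpre])]
        simp only [List.length_cons] at h
        rw [ih _ _ _ (by omega)]
        simp only [splitC, if_neg hx]
        cases hs : splitC c t with
        | nil => exact absurd hs (splitC_ne_nil c t)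
        | cons p ps => simp

lemma splitOn_eq_splitC (c : Char) (l : List Char) :
    PySem.Chars.splitOn l [c] = splitC c l := by
  have := splitOn_go_spec c (l.length + 1) l [] [] (by omega)
  rw [PySem.Chars.splitOn] at *
  rw [this]
  cases hs : splitC c l with
  | nil => exact absurd hs (splitC_ne_nil c l)
  | cons p ps => simp

/-- `replace.go` with a single-char old and empty new filters the character out. -/
lemma replace_go_spec (c : Char) : ∀ (fuel : Nat) (l acc : List Char),
    l.length ≤ fuel →
    PySem.Chars.replace.go [c] [] fuel l acc =
      acc.reverse ++ l.filter (fun x => x ≠ c) := by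
  intro fuel
  induction fuel with
  | zero =>
    intro l acc h
    have : l = [] := List.eq_nil_of_length_eq_zero (Nat.le_zero.mp h)
    subst this
    simp [PySem.Chars.replace.go]
  | succ fuel ih =>
    intro l acc h
    cases l with
    | nil => simp [PySem.Chars.replace.go]
    | cons x t =>
      simp only [PySem.Chars.replace.go]
      simp only [List.length_cons] at h
      by_cases hx : x = c
      · subst hx
        have hpre : [x].isPrefixOf (x :: t) = true := by simp [List.isPrefixOf]
        rw [if_pos hpre]
        simp only [List.length_cons, List.length_nil, List.drop_succ_cons, List.drop_zero]
        rw [ih _ _ (by omega)]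
        simp
      · have hpre : [c].isPrefixOf (x :: t) = false := by
          simp [List.isPrefixOf]
          exact fun hxc => hx hxc.symm
        rw [if_neg (by simp [hpre])]
        rw [ih _ _ (by omega)]
        simp [hx]

lemma replace_filter (c : Char) (l : List Char) :
    PySem.Chars.replace l [c] [] = l.filter (fun x => x ≠ c) := by
  rw [PySem.Chars.replace]
  simp only [List.isEmpty_cons, if_false, Bool.false_eq_true]
  exact replace_go_spec c l.length l [] le_rfl

/-- join with single-char sep of the split pieces restores the string. -/
lemma join_splitC (c : Char) (l : List Char) :
    PySem.Chars.join [c] (splitC c l) = l := by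
  induction l with
  | nil => simp [splitC, PySem.Chars.join, List.intercalate]
  | cons x t ih =>
    simp only [splitC]
    by_cases hx : x = c
    · subst hx
      cases hs : splitC x t with
      | nil => exact absurd hs (splitC_ne_nil x t)
      | cons p ps =>
        rw [if_pos rfl, PySem.Chars.join_cons_cons]
        rw [hs] at ih
        simp [PySem.Chars.join] at ih ⊢
        simp [ih]
    · rw [if_neg hx]
      cases hs : splitC c t with
      | nil => exact absurd hs (splitC_ne_nil c t)
      | cons p ps =>
        rw [hs] at ih
        cases ps with
        | nil => simp [PySem.Chars.join, List.intercalate] at ih ⊢; simp [ih]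
        | cons q qs =>
          rw [PySem.Chars.join_cons_cons] at ih
          rw [PySem.Chars.join_cons_cons]
          simp [← ih]

/-- reversing the pieces and each piece reverses a single-char-sep join. -/
lemma join_reverse (c : Char) (ps : List (List Char)) :
    PySem.Chars.join [c] (ps.reverse.map List.reverse) =
      (PySem.Chars.join [c] ps).reverse := by
  induction ps with
  | nil => simp [PySem.Chars.join, List.intercalate]
  | cons p rest ih =>
    cases rest with
    | nil => simp [PySem.Chars.join, List.intercalate]
    | cons q qs =>
      rw [PySem.Chars.join_cons_cons]
      have : ((p :: q :: qs).reverse.map List.reverse) =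
          ((q :: qs).reverse.map List.reverse) ++ [p.reverse] := by simp
      rw [this]
      have hjoin : ∀ (ys : List (List Char)) (z : List Char), ys ≠ [] →
          PySem.Chars.join [c] (ys ++ [z]) =
            PySem.Chars.join [c] ys ++ [c] ++ z := by
        intro ys z hys
        induction ys with
        | nil => simp at hys
        | cons y ys' ih' =>
          cases ys' with
          | nil => simp [PySem.Chars.join, List.intercalate]
          | cons w ws =>
            simp only [List.cons_append] at ih' ⊢
            rw [PySem.Chars.join_cons_cons, ih' (by simp),
              PySem.Chars.join_cons_cons]
            simp
      rw [hjoin _ _ (by simp), ih]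
      simp

lemma join_nil_eq_flatten (ps : List (List Char)) :
    PySem.Chars.join [] ps = ps.flatten := by
  induction ps with
  | nil => simp [PySem.Chars.join, List.intercalate]
  | cons p rest ih =>
    cases rest with
    | nil => simp [PySem.Chars.join, List.intercalate]
    | cons q qs =>
      rw [PySem.Chars.join_cons_cons, ih]
      simp

lemma flatten_splitC (c : Char) (l : List Char) :
    (splitC c l).flatten = l.filter (fun x => x ≠ c) := by
  induction l with
  | nil => simp [splitC]
  | cons x t ih =>
    simp only [splitC]
    by_cases hx : x = c
    · subst hx
      simp [ih]
    · rw [if_neg hx]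
      cases hs : splitC c t with
      | nil => exact absurd hs (splitC_ne_nil c t)
      | cons p ps =>
        rw [hs] at ih
        simpa [hx] using ih

-- ===== VERDICT (by name: the statement is the Claim_ definition above) =====
theorem reverse_text_spec : Claim_equal_reverse_text := by
  intro text _
  unfold Spec_reverse_text reverse_text reverse_text_alt
  simp only []
  congr 1
  rw [replace_filter]
  rw [splitOn_eq_splitC]
  have hline : ∀ line : List Char,
      PySem.Chars.join [' ']
        (((PySem.Chars.splitOn line [' ']).reverse).map (fun w => w.reverse)) =
        line.reverse := by
    intro line
    rw [splitOn_eq_splitC]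
    have := join_reverse ' ' (splitC ' ' line)
    simp only [join_splitC] at this
    simpa using this
  simp only [hline]
  rw [join_nil_eq_flatten]
  have hflat : ((splitC '\n' text.toList).map (fun l => l.reverse)).reverse.flatten
      = ((splitC '\n' text.toList).flatten).reverse := by
    rw [List.reverse_flatten]
  rw [hflat, flatten_splitC, ← List.filter_reverse]
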